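-- pv_equiv track=rewrite | github.com/Patel27-S/Basic-2 | change_char.py | change_char
-- ===== SOURCE A (Python) =====
-- def change_char(string):
--   '''This function changes all the
--   first character re-occurences to '$' sign
--   in the input string.'''
--   a = string[0]
--   output_string = ''
--
--   # The loop iterates through all the indices of string.
--
--   for i in range(len(string)):
--
--     # If the character is not same as 1st character
--     # Simple concatenation with the same character
--     if i == 0 or string[i] != a:
--       output_string += string[i]
--
--     # If the character is equal to 1st character.
--     else:
--       output_string += '$'
--
--   return output_string
-- ===== SOURCE B (Python) =====
-- def change_char(string):
--     a = string[0]
--     return a + string[1:].replace(a, '$')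
-- ===== Notes on version B (the rewrite author's own statement) =====
-- stated objective: idiomatic
-- what changed: Replaces A's explicit index loop with per-character branching and repeated string concatenation by slicing off the first character and delegating the substitution of the remainder to a single str.replace builtin call.
import Mathlib
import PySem

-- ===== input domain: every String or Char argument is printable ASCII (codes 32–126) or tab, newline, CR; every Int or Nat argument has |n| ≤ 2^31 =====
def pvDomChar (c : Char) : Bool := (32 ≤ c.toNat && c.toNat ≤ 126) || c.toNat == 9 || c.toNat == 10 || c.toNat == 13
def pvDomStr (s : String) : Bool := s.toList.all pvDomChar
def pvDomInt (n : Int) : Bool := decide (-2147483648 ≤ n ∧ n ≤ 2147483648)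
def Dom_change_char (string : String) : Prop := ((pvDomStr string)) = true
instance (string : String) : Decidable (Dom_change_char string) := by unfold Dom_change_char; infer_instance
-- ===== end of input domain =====

-- B replaces A's explicit index loop with slice-off-first-char + a single str.replace call (idiomatic).

-- ===== PORT A =====
-- a = string[0] raises IndexError on "" (excluded by Pre_); ' ' default is never read under Pre_.
def change_char (string : String) : String :=
  let s := string.toList
  let a := PySem.List.pyGetD s 0 ' '
  let out := (PySem.List.pyRange 0 (PySem.List.len s)).foldl
    (fun output_string i =>
      if i = 0 ∨ PySem.List.pyGetD s i ' ' ≠ a then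
        output_string ++ [PySem.List.pyGetD s i ' ']
      else
        output_string ++ ['$']) []
  String.ofList out

-- ===== PORT B =====
-- a + string[1:].replace(a, '$')
def change_char_alt (string : String) : String :=
  let s := string.toList
  let a := PySem.List.pyGetD s 0 ' '
  String.ofList ([a] ++ PySem.Chars.replace (PySem.List.slice s (some 1) none) [a] ['$'])

-- ===== PRECONDITION & SPEC =====
-- A (and B) raise IndexError on the empty string (string[0]); exactly that input is excluded.
def Pre_change_char (string : String) : Prop := string ≠ ""
instance (string : String) : Decidable (Pre_change_char string) := by unfold Pre_change_char; infer_instance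
def pvWitness_change_char : String := "abcab"
def Spec_change_char (string : String) (out : String) : Prop := out = change_char_alt string
instance (string : String) (out : String) : Decidable (Spec_change_char string out) := by unfold Spec_change_char; infer_instance

-- ===== CLAIM (what is proved, stated in full; the proofs are below) =====
def Claim_equal_change_char : Prop := ∀ (string : String), Dom_change_char string → Pre_change_char string → Spec_change_char string (change_char string)

-- ===== LEMMAS AND PROOFS =====

/-- Two-branch append fold collapses to an append of a map. -/
theorem foldl_append_ite {α β : Type} (p : α → Prop) [DecidablePred p] (f g : α → β)
    (l : List α) (acc : List β) :
    List.foldl (fun acc x => if p x then acc ++ [f x] else acc ++ [g x]) acc l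
      = acc ++ l.map (fun x => if p x then f x else g x) := by
  induction l generalizing acc with
  | nil => simp
  | cons x xs ih => simp only [List.foldl_cons, List.map_cons, ih]; split_ifs <;> simp

/-- `Chars.replace.go` with a single-character pattern is a pointwise map. -/
theorem replace_go_single (a : Char) :
    ∀ (fuel : Nat) (l acc : List Char), l.length ≤ fuel →
      PySem.Chars.replace.go [a] ['$'] fuel l acc
        = acc.reverse ++ l.map (fun c => if c = a then '$' else c) := by
  intro fuel
  induction fuel with
  | zero =>
    intro l acc h
    interval_cases hl : l.length
    · simp [List.length_eq_zero_iff.mp hl, PySem.Chars.replace.go]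
  | succ n ih =>
    intro l acc h
    cases l with
    | nil => simp [PySem.Chars.replace.go]
    | cons c t =>
      by_cases hc : c = a
      · have hp : List.isPrefixOf [a] (c :: t) = true := by simp [List.isPrefixOf, hc]
        simp only [PySem.Chars.replace.go, hp, if_pos]
        rw [ih _ _ (by simpa using Nat.le_of_succ_le_succ h)]
        simp [hc]
      · have hp : List.isPrefixOf [a] (c :: t) = false := by
          simp [List.isPrefixOf]; exact fun h' => hc h'.symm
        simp only [PySem.Chars.replace.go, hp]
        rw [if_neg (by simp), ih _ _ (by simpa using Nat.le_of_succ_le_succ h)]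
        simp [hc]

theorem replace_single (a : Char) (l : List Char) :
    PySem.Chars.replace l [a] ['$'] = l.map (fun c => if c = a then '$' else c) := by
  simp only [PySem.Chars.replace, List.isEmpty_cons]
  rw [if_neg (by simp)]
  exact replace_go_single a l.length l [] le_rfl

/-- The indexed tail of the A-side map: reading positions `k, k+1, …` of `pre ++ rest`
    (with `pre.length = k`) through `F` is just mapping `F` over `rest`. -/
theorem map_pyGetD_shift (F : Char → Char) :
    ∀ (rest pre : List Char),
      (PySem.List.pyRange (pre.length : Int) ((pre.length : Int) + rest.length)).map
          (fun i => F (PySem.List.pyGetD (pre ++ rest) i ' '))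
        = rest.map F := by
  intro rest
  induction rest with
  | nil => intro pre; simp
  | cons r rs ih =>
    intro pre
    have hlt : (pre.length : Int) < (pre.length : Int) + ((r :: rs).length : Int) := by
      simp only [List.length_cons]; push_cast; omega
    rw [PySem.List.pyRange_one_cons hlt, List.map_cons]
    have h0 : PySem.List.pyGetD (pre ++ r :: rs) (pre.length : Int) ' ' = r := by
      simp [PySem.List.pyGetD_natCast, List.getD]
    have htail := ih (pre ++ [r])
    simp only [List.length_append, List.length_singleton, List.append_assoc,
      List.singleton_append] at htail
    rw [h0, List.map_cons, ← htail]
    congr 2 <;> simp only [List.length_cons] <;> push_cast <;> ring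

-- ===== VERDICT (by name: the statement is the Claim_ definition above) =====
theorem change_char_spec : Claim_equal_change_char := by
  intro string _ hpre
  unfold Spec_change_char change_char change_char_alt
  have hne : string.toList ≠ [] := by
    simpa using hpre
  obtain ⟨c, rest, hs⟩ := List.exists_cons_of_ne_nil hne
  simp only [hs]
  have ha : PySem.List.pyGetD (c :: rest) 0 ' ' = c := by
    simp [PySem.List.pyGetD_zero_cons]
  rw [ha, PySem.List.slice_from_one, List.tail_cons, replace_single]
  congr 1
  rw [foldl_append_ite]
  have hlen : PySem.List.len (c :: rest) = (c :: rest).length := PySem.List.len_eq _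
  rw [hlen]
  have h0 : (0 : Int) < ((c :: rest).length : Int) := by simp only [List.length_cons]; push_cast; omega
  rw [show ((c :: rest).length : Int) = (0:Int) + (c :: rest).length by ring] at h0 ⊢
  rw [PySem.List.pyRange_one_cons h0, List.map_cons]
  have hF := map_pyGetD_shift (fun x => if x = c then '$' else x) rest [c]
  simp only [List.length_singleton, List.singleton_append, Nat.cast_one] at hF
  simp only [ha, List.nil_append]
  rw [show (0:Int) + 1 = (1:Int) by ring, show ((0:Int) + ((c :: rest).length : Int) = (1:Int) + (rest.length : Int)) by simp only [List.length_cons]; push_cast; ring]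
  congr 1
  rw [← hF]
  apply List.map_congr_left
  intro i hi
  have hmem := PySem.List.mem_pyRange_one.mp hi
  have h1 : ¬ (i = 0) := by omega
  simp only [h1, false_or]
  by_cases hca : PySem.List.pyGetD (c :: rest) i ' ' = c <;> simp [hca]
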